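-- pv_equiv track=rewrite | github.com/alpha-kwhn/Programmers | Level1/대충 만든 자판.py | solution
-- ===== SOURCE A (Python) =====
-- from collections import OrderedDict
--
-- def solution(keymap, targets):
--     answer = []
--     diction = {}
--     # 1. target에 있는 문자열을 완성하기 위해 필요한 알파벳 조사 & 알파벳 순서에 맞게 알파벳 정렬
--     tmp = ''.join(targets)
--     tmp = ''.join(OrderedDict.fromkeys(tmp))
--
--     # 2. keymap 문자열 탐색하며 가장 적은 횟수로 알파벳 쓸 수 있는 경우 찾기
--     for i in tmp:
--         for j in keymap:
--             # 3. target 문자열에 들어가는 문자가 keymap에서 몇번째 index에 있는지 확인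
--             index = j.find(i)
--             # 3.1 targets에 속한 알파벳의 딕셔너리 값이 존재한다면
--             if i in diction:
--                 # 3.1.1 만일 딕셔너리 값이 0이라면 continue
--                 if diction[i] == 0:
--                     continue
--                 # 3.1.2 딕셔너리 값이 0이 아니라면
--                 else:
--                     # 3.2.1 딕셔너리 값이 -1이 아니고, keymap에서 찾을 수 있는 알파벳이면서 기존 딕셔너리 값보다 index가 작은경우
--                     if diction[i] != -1 and diction[i] > index and index != -1:
--                         # 값 교체
--                         diction[i] = index
--                     # 3.2.2 딕셔너리 값이 -1인데 index 값이 -1이 아닌경우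
--                     elif diction[i] == -1 and index != -1:
--                         # 값 교체
--                         diction[i] = index
--                     # 3.2.3 keymap에서 target을 구성하는 알파벳을 찾을 수 없는 경우 -> continue
--                     elif index == -1:
--                         continue
--             # 3.3 target에 속한 알파벳의 딕셔너리 값이 없다면, keymap에서 찾은 알파벳의 index 값을 대입
--             else:
--                 diction[i] = index
--     # 4. 정답 내기
--     for i in targets:
--         count = 0
--         # 4.1 target의 영단어 속 알파벳을 키로 가지는 딕셔너리의 value가 -1이 아니라면 count에 (diction[j] + 1)을 추가
--         # -1이라면 배열에 -1을 넣어주고 break해서 값이 훼손되는 것을 방지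
--         for j in i:
--             if diction[j] != -1:
--                 count += (diction[j] + 1)
--             else:
--                 count = -1
--                 break
--         answer.append(count)
--
--     return answer
-- ===== SOURCE B (Python) =====
-- def solution(keymap, targets):
--     answer = []
--     for word in targets:
--         count = 0
--         for ch in word:
--             best = -1
--             for k in keymap:
--                 pos = k.find(ch)
--                 if pos != -1 and (best == -1 or pos < best):
--                     best = pos
--             if best == -1:
--                 count = -1
--                 break
--             count += best + 1
--         answer.append(count)
--     return answer
-- ===== Notes on version B (the rewrite author's own statement) =====
-- stated objective: simpler
-- what changed: Drops A's precomputed per-character dict (global dedup of joined targets plus a stateful four-branch update loop) in favour of a direct triple loop: for each character of each word, scan the keymaps on demand and take the minimum first-occurrence index.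
import Mathlib
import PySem

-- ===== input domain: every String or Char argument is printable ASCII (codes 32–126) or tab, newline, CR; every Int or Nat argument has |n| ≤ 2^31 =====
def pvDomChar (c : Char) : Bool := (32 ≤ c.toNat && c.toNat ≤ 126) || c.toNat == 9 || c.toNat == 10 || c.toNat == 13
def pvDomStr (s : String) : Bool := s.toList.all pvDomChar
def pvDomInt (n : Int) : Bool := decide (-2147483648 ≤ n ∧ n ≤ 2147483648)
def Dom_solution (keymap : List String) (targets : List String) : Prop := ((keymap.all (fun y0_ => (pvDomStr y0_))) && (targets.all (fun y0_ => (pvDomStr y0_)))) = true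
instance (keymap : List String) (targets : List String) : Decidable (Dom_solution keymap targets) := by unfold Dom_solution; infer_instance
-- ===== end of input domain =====

-- B replaces A's precomputed per-character dict table by a direct triple loop (min over keymaps, on demand): simpler, no speed claim.
-- Pre_ excludes keymap = [] with a non-empty target, where A raises KeyError (B simply returns -1 for each non-empty word there).

-- ===== PORT A =====
-- one step of A's inner 'for j in keymap' loop, for the current character i
def pvStepA (i : Char) (d : PySem.Dict Char Int) (j : String) : PySem.Dict Char Int :=
  let index : Int := PySem.Str.find j (String.ofList [i])
  if d.contains i then
    let v := d.getD i 0
    if v = 0 then d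
    else if v ≠ -1 ∧ v > index ∧ index ≠ -1 then d.insert i index
    else if v = -1 ∧ index ≠ -1 then d.insert i index
    else d
  else d.insert i index

-- A's phase-4 inner loop: count with break on -1 (diction[j] ported as getD with default 0; only
-- reachable where the Python raises KeyError, which Pre_ excludes)
def pvCountA (d : PySem.Dict Char Int) : List Char → Int → Int
  | [], count => count
  | j :: rest, count =>
      if d.getD j 0 ≠ -1 then pvCountA d rest (count + (d.getD j 0 + 1)) else -1

def solution (keymap : List String) (targets : List String) : List Int :=
  let tmp : List Char := PySem.List.dedup ((targets.map String.toList).flatten)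
  let diction : PySem.Dict Char Int :=
    tmp.foldl (fun d i => keymap.foldl (pvStepA i) d) PySem.Dict.empty
  targets.foldl (fun answer i => answer ++ [pvCountA diction i.toList 0]) []

-- ===== PORT B =====
def pvBest (keymap : List String) (ch : Char) : Int :=
  keymap.foldl (fun best k =>
    let pos : Int := PySem.Str.find k (String.ofList [ch])
    if pos ≠ -1 ∧ (best = -1 ∨ pos < best) then pos else best) (-1)

def pvCountB (keymap : List String) : List Char → Int → Int
  | [], count => count
  | ch :: rest, count =>
      let b := pvBest keymap ch
      if b = -1 then -1 else pvCountB keymap rest (count + (b + 1))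

def solution_alt (keymap : List String) (targets : List String) : List Int :=
  targets.map (fun word => pvCountB keymap word.toList 0)

-- ===== PRECONDITION & SPEC =====
-- Pre_ excludes exactly the inputs where A raises KeyError: empty keymap together with a non-empty target word.
def Pre_solution (keymap : List String) (targets : List String) : Prop :=
  keymap ≠ [] ∨ (targets.all (fun t => t = "")) = true
instance (keymap : List String) (targets : List String) : Decidable (Pre_solution keymap targets) := by unfold Pre_solution; infer_instance
def pvWitness_solution : List String × List String := (["ABACD", "BCEFD"], ["ABCD", "AABB"])

def Spec_solution (keymap : List String) (targets : List String) (out : List Int) : Prop := out = solution_alt keymap targets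
instance (keymap : List String) (targets : List String) (out : List Int) : Decidable (Spec_solution keymap targets out) := by unfold Spec_solution; infer_instance

-- ===== CLAIM (what is proved, stated in full; the proofs are below) =====
def Claim_equal_solution : Prop := ∀ (keymap : List String) (targets : List String), Dom_solution keymap targets → Pre_solution keymap targets → Spec_solution keymap targets (solution keymap targets)

-- ===== LEMMAS AND PROOFS =====

-- B's value-level step function
def pvF (best pos : Int) : Int := if pos ≠ -1 ∧ (best = -1 ∨ pos < best) then pos else best

theorem pvF_neg_one (p : Int) : pvF (-1) p = p := by
  unfold pvF; split_ifs with h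
  · rfl
  · push Not at h; by_cases hp : p = -1
    · omega
    · simp [hp] at h

theorem pvBest_eq_foldl (keymap : List String) (ch : Char) :
    pvBest keymap ch = keymap.foldl (fun b k => pvF b (PySem.Str.find k (String.ofList [ch]))) (-1) := rfl

-- A's value-level update equals B's, when -1 ≤ pos (always true of find results)
theorem pvStep_value (v p : Int) (hp : -1 ≤ p) :
    (if v = 0 then v
     else if v ≠ -1 ∧ v > p ∧ p ≠ -1 then p
     else if v = -1 ∧ p ≠ -1 then p
     else v) = pvF v p := by
  unfold pvF; split_ifs <;> omega

-- pvStepA on a dict that already holds key i: lookup at i updates by pvF, other keys unchanged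
theorem pvStepA_get?_some (i : Char) (d : PySem.Dict Char Int) (j : String) (v : Int)
    (hv : d.get? i = some v) :
    (pvStepA i d j).get? i = some (pvF v (PySem.Str.find j (String.ofList [i]))) := by
  have hc : d.contains i = true := by
    rw [PySem.Dict.contains_eq_isSome_get?, hv]; rfl
  have hgd : d.getD i 0 = v := by rw [PySem.Dict.getD_eq_get?_getD, hv]; rfl
  have hp : -1 ≤ PySem.Str.find j (String.ofList [i]) := by
    simpa using PySem.Chars.neg_one_le_find (j.toList) ((String.ofList [i]).toList)
  unfold pvStepA
  rw [← pvStep_value v _ hp]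
  simp only [hc, if_true, hgd]
  split_ifs <;> simp_all [PySem.Dict.get?_insert_self]

theorem pvStepA_get?_ne (i : Char) (d : PySem.Dict Char Int) (j : String) (c : Char)
    (hne : c ≠ i) : (pvStepA i d j).get? c = d.get? c := by
  simp only [pvStepA]
  split_ifs <;> simp [PySem.Dict.get?_insert_of_ne _ _ hne]

-- folding pvStepA over a tail of keymaps, starting from a dict holding v at i
theorem pvFold_some (ks : List String) (i : Char) (d : PySem.Dict Char Int) (v : Int)
    (hv : d.get? i = some v) :
    (ks.foldl (pvStepA i) d).get? i =
      some (ks.foldl (fun b k => pvF b (PySem.Str.find k (String.ofList [i]))) v) := by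
  induction ks generalizing d v with
  | nil => simpa using hv
  | cons k ks ih =>
      simp only [List.foldl_cons]
      exact ih _ _ (pvStepA_get?_some i d k v hv)

theorem pvFold_ne (ks : List String) (i : Char) (d : PySem.Dict Char Int) (c : Char)
    (hne : c ≠ i) : (ks.foldl (pvStepA i) d).get? c = d.get? c := by
  induction ks generalizing d with
  | nil => rfl
  | cons k ks ih =>
      simp only [List.foldl_cons]
      rw [ih, pvStepA_get?_ne i d k c hne]

-- the whole inner loop for a fresh key i, nonempty keymap: result is pvBest
theorem pvInner_fresh (keymap : List String) (hk : keymap ≠ []) (i : Char)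
    (d : PySem.Dict Char Int) (hd : d.get? i = none) :
    (keymap.foldl (pvStepA i) d).get? i = some (pvBest keymap i) := by
  cases keymap with
  | nil => exact absurd rfl hk
  | cons k ks =>
      simp only [List.foldl_cons]
      have hc : d.contains i = false := by
        rw [PySem.Dict.contains_eq_isSome_get?, hd]; rfl
      have h1 : (pvStepA i d k).get? i = some (PySem.Str.find k (String.ofList [i])) := by
        unfold pvStepA; simp [hc, PySem.Dict.get?_insert_self]
      rw [pvFold_some ks i _ _ h1, pvBest_eq_foldl]
      simp only [List.foldl_cons, pvF_neg_one]

-- outer loop invariant over a nodup list of fresh characters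
theorem pvOuter (keymap : List String) (hk : keymap ≠ []) (l : List Char)
    (d : PySem.Dict Char Int) (hnd : l.Nodup) (hfresh : ∀ c ∈ l, d.get? c = none) :
    ∀ c, (l.foldl (fun d i => keymap.foldl (pvStepA i) d) d).get? c =
      if c ∈ l then some (pvBest keymap c) else d.get? c := by
  induction l generalizing d with
  | nil => intro c; simp
  | cons i rest ih =>
      intro c
      simp only [List.foldl_cons]
      have hnd' : rest.Nodup := hnd.of_cons
      have hni : i ∉ rest := (List.nodup_cons.mp hnd).1
      have hfresh' : ∀ c ∈ rest, (keymap.foldl (pvStepA i) d).get? c = none := by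
        intro c hc
        rw [pvFold_ne keymap i d c (by rintro rfl; exact hni hc)]
        exact hfresh c (List.mem_cons_of_mem _ hc)
      rw [ih _ hnd' hfresh']
      by_cases hcr : c ∈ rest
      · simp [hcr, List.mem_cons_of_mem _ hcr]
      · by_cases hci : c = i
        · subst hci
          simp [hcr, pvInner_fresh keymap hk c d (hfresh c (List.mem_cons_self ..))]
        · simp [hcr, hci, pvFold_ne keymap i d c hci]

-- per-word counts agree when every character's diction value is pvBest
theorem pvCount_agree (keymap : List String) (d : PySem.Dict Char Int) (w : List Char)
    (h : ∀ c ∈ w, d.getD c 0 = pvBest keymap c) :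
    ∀ acc, pvCountA d w acc = pvCountB keymap w acc := by
  induction w with
  | nil => intro acc; rfl
  | cons c rest ih =>
      intro acc
      have hc : d.getD c 0 = pvBest keymap c := h c (List.mem_cons_self ..)
      have ih' := ih (fun x hx => h x (List.mem_cons_of_mem _ hx))
      unfold pvCountA pvCountB
      rw [hc]
      by_cases hb : pvBest keymap c = -1 <;> simp [hb, ih']

-- ===== VERDICT (by name: the statement is the Claim_ definition above) =====
theorem solution_spec : Claim_equal_solution := by
  intro keymap targets _ hpre
  unfold Spec_solution solution solution_alt
  rw [PySem.List.foldl_append_singleton_eq_map]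
  apply List.map_congr_left
  intro w hw
  rcases hpre with hk | hall
  · -- keymap nonempty: the diction holds pvBest for every character of every target
    apply pvCount_agree
    intro c hc
    have hmem : c ∈ PySem.List.dedup ((targets.map String.toList).flatten) := by
      rw [PySem.List.mem_dedup]
      exact List.mem_flatten.mpr ⟨w.toList, List.mem_map_of_mem hw, hc⟩
    have := pvOuter keymap hk (PySem.List.dedup ((targets.map String.toList).flatten))
      PySem.Dict.empty (PySem.List.nodup_dedup _)
      (fun c _ => PySem.Dict.get?_empty c) c
    rw [if_pos hmem] at this
    rw [PySem.Dict.getD_eq_get?_getD, this]; rfl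
  · -- all targets empty: both counts are 0
    have hw0 : w = "" := by
      have := List.all_eq_true.mp hall w hw
      simpa using this
    subst hw0
    rfl
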